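-- pv_equiv track=rewrite | github.com/Drought-Ender/Drought-Cave-Creator | CaveLibrary/cave.py | readID32Line
-- ===== SOURCE A (Python) =====
-- id32 = '$0123456789abcdefghijklmnopqrstuvwxyz_-ABCDEFGHIJKLMNOPQRSTUVWXYZ.'
--
-- def next_string(line:str, subindex = 0):
--     while subindex < len(line) and line[subindex] not in id32:
--         subindex += 1
--     if subindex >= len(line):
--         return None, subindex
--     start = subindex
--     while subindex < len(line) and line[subindex] in id32:
--         subindex += 1
--     return line[start:subindex], subindex + 1
--
-- def readID32Line(line:str):
--     subindex = 0
--     while subindex < len(line) and line[subindex].lower() not in id32: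
--         subindex += 1
--     _id = line[subindex:subindex+4]
--     typeof, place = next_string(line, subindex+4)
--     second, place = next_string(line, place)
--     return _id, second
-- ===== SOURCE B (Python) =====
-- id32 = '$0123456789abcdefghijklmnopqrstuvwxyz_-ABCDEFGHIJKLMNOPQRSTUVWXYZ.'
--
-- def readID32Line(line: str):
--     s = 0
--     n = len(line)
--     while s < n and line[s] not in id32:
--         s += 1
--     runs = []
--     cur = ''
--     for ch in line[s + 4:]:
--         if ch in id32:
--             cur += ch
--         else:
--             if cur:
--                 runs.append(cur)
--             cur = ''
--     if cur:
--         runs.append(cur)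
--     return line[s:s + 4], (runs[1] if len(runs) >= 2 else None)
-- ===== Notes on version B (the rewrite author's own statement) =====
-- stated objective: simpler
-- what changed: B replaces A's two resumable next_string index scans (each with its own skip-then-consume while loops and a +1 resume offset) by a single pass that builds the list of all maximal id32-character runs after the 4-char id slice and returns its second element (or None).
import Mathlib
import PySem

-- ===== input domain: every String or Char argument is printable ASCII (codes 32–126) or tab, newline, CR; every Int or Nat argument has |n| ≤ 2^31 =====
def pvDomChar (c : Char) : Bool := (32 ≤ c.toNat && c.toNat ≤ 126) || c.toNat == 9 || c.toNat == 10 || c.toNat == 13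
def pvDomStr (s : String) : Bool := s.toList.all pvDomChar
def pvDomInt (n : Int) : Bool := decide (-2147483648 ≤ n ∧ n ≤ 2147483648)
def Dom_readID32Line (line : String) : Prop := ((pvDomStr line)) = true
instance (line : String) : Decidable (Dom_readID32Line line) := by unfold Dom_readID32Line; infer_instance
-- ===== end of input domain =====

-- B replaces A's two resumable next_string index scans by one pass that builds the full list of
-- maximal id32-runs after the id slice and indexes it (objective: simpler decomposition, same cost).

-- ===== PORT A =====
def id32 : List Char := "$0123456789abcdefghijklmnopqrstuvwxyz_-ABCDEFGHIJKLMNOPQRSTUVWXYZ.".toList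

-- A's first while: while subindex < len(line) and line[subindex].lower() not in id32
-- (Char.toLower is exact for Python str.lower on the ASCII domain)
def skipLowA (cs : List Char) (i : Nat) : Nat :=
  if h : i < cs.length then
    if cs[i].toLower ∈ id32 then i else skipLowA cs (i + 1)
  else i
termination_by cs.length - i

-- first while of next_string
def nsSkip (cs : List Char) (i : Nat) : Nat :=
  if h : i < cs.length then
    if cs[i] ∈ id32 then i else nsSkip cs (i + 1)
  else i
termination_by cs.length - i

-- second while of next_string
def nsRun (cs : List Char) (i : Nat) : Nat :=
  if h : i < cs.length then
    if cs[i] ∈ id32 then nsRun cs (i + 1) else i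
  else i
termination_by cs.length - i

-- next_string; line[start:subindex] with 0 ≤ start ≤ subindex ≤ len is exactly (drop start).take (subindex - start)
def nextString (cs : List Char) (sub : Nat) : Option (List Char) × Nat :=
  let j := nsSkip cs sub
  if cs.length ≤ j then (none, j)
  else
    let e := nsRun cs j
    (some ((cs.drop j).take (e - j)), e + 1)

def readID32Line (line : String) : String × Option String :=
  let cs := line.toList
  let s := skipLowA cs 0
  let _id := (cs.drop s).take 4      -- line[s:s+4], a non-negative in-range slice
  let r1 := nextString cs (s + 4)
  let r2 := nextString cs r1.2
  (String.mk _id, r2.1.map String.mk)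

-- ===== PORT B =====
-- Source B's skip loop: while s < n and line[s] not in id32
def skipB (cs : List Char) (i : Nat) : Nat :=
  if h : i < cs.length then
    if cs[i] ∈ id32 then i else skipB cs (i + 1)
  else i
termination_by cs.length - i

-- Source B's for-loop accumulating the maximal id32-runs, plus the trailing flush
def runsLoop (rest : List Char) (runs : List (List Char)) (cur : List Char) : List (List Char) :=
  match rest with
  | [] => if cur ≠ [] then runs ++ [cur] else runs
  | c :: t =>
    if c ∈ id32 then runsLoop t runs (cur ++ [c])
    else runsLoop t (if cur ≠ [] then runs ++ [cur] else runs) []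

def readID32Line_alt (line : String) : String × Option String :=
  let cs := line.toList
  let s := skipB cs 0
  let runs := runsLoop (cs.drop (s + 4)) [] []
  (String.mk ((cs.drop s).take 4),
   (if 2 ≤ runs.length then runs[1]? else none).map String.mk)

-- ===== PRECONDITION & SPEC =====
def Spec_readID32Line (line : String) (out : String × Option String) : Prop := out = readID32Line_alt line
instance (line : String) (out : String × Option String) : Decidable (Spec_readID32Line line out) := by unfold Spec_readID32Line; infer_instance

-- ===== CLAIM (what is proved, stated in full; the proofs are below) =====
def Claim_equal_readID32Line : Prop := ∀ (line : String), Dom_readID32Line line → Spec_readID32Line line (readID32Line line)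

-- ===== LEMMAS AND PROOFS =====

-- Lean's Char.toLower only moves 'A'..'Z', and id32 contains both cases, so lowering preserves membership.
lemma toLower_mem_id32 (c : Char) : (c.toLower ∈ id32) ↔ (c ∈ id32) := by
  by_cases h : c.val ≥ 'A'.val ∧ c.val ≤ 'Z'.val
  · have h1 : 65 ≤ c.toNat ∧ c.toNat ≤ 90 := by
      obtain ⟨ha, hb⟩ := h
      simp only [ge_iff_le, UInt32.le_iff_toNat_le] at ha hb
      exact ⟨ha, hb⟩
    have hc : Char.ofNat c.toNat = c := Char.ofNat_toNat c
    obtain ⟨h65, h90⟩ := h1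
    rw [← hc]
    set n := c.toNat with hn
    clear_value n
    interval_cases n <;> decide
  · have heq : c.toLower = c := by unfold Char.toLower; rw [dif_neg h]
    rw [heq]

lemma skip_eq (cs : List Char) (i : Nat) : skipLowA cs i = skipB cs i := by
  fun_induction skipLowA cs i with
  | case1 i h hm => rw [skipB]; simp [h, (toLower_mem_id32 _).mp hm]
  | case2 i h hm ih =>
      rw [skipB]
      simp only [h, dif_pos]
      rw [if_neg (fun hc => hm ((toLower_mem_id32 _).mpr hc)), ih]
  | case3 i h => rw [skipB]; simp [h]

lemma nsSkip_ge (cs : List Char) (i : Nat) : i ≤ nsSkip cs i := by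
  fun_induction nsSkip cs i <;> omega

lemma nsRun_ge (cs : List Char) (i : Nat) : i ≤ nsRun cs i := by
  fun_induction nsRun cs i <;> omega

lemma nsSkip_stop (cs : List Char) (i : Nat) (h : cs.length ≤ i) : nsSkip cs i = i := by
  rw [nsSkip]; simp [Nat.not_lt.mpr h]

lemma nsSkip_mem (cs : List Char) (i : Nat) (h : i < cs.length) (hm : cs[i] ∈ id32) :
    nsSkip cs i = i := by
  rw [nsSkip]; simp [h, hm]

lemma nsSkip_notmem (cs : List Char) (i : Nat) (h : i < cs.length) (hm : cs[i] ∉ id32) :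
    nsSkip cs i = nsSkip cs (i + 1) := by
  rw [nsSkip]; simp [h, hm]

lemma nsRun_stop (cs : List Char) (i : Nat) (h : cs.length ≤ i) : nsRun cs i = i := by
  rw [nsRun]; simp [Nat.not_lt.mpr h]

lemma nsRun_mem (cs : List Char) (i : Nat) (h : i < cs.length) (hm : cs[i] ∈ id32) :
    nsRun cs i = nsRun cs (i + 1) := by
  rw [nsRun]; simp [h, hm]

lemma nsRun_notmem (cs : List Char) (i : Nat) (h : i < cs.length) (hm : cs[i] ∉ id32) :
    nsRun cs i = i := by
  rw [nsRun]; simp [h, hm]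

-- the stream of tokens next_string would produce from index i on
def tokensFrom (cs : List Char) (i : Nat) : List (List Char) :=
  if h : nsSkip cs i < cs.length then
    (cs.drop (nsSkip cs i)).take (nsRun cs (nsSkip cs i) - nsSkip cs i)
      :: tokensFrom cs (nsRun cs (nsSkip cs i) + 1)
  else []
termination_by cs.length - i
decreasing_by
  have h1 := nsSkip_ge cs i
  have h2 := nsRun_ge cs (nsSkip cs i)
  omega

lemma tokensFrom_stop (cs : List Char) (i : Nat) (h : cs.length ≤ i) : tokensFrom cs i = [] := by
  rw [tokensFrom]; simp [nsSkip_stop cs i h, Nat.not_lt.mpr h]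

lemma tokensFrom_shift (cs : List Char) (i : Nat) (h : i < cs.length) (hm : cs[i] ∉ id32) :
    tokensFrom cs i = tokensFrom cs (i + 1) := by
  conv_lhs => rw [tokensFrom]
  conv_rhs => rw [tokensFrom]
  rw [nsSkip_notmem cs i h hm]

lemma tokensFrom_mem (cs : List Char) (i : Nat) (h : i < cs.length) (hm : cs[i] ∈ id32) :
    tokensFrom cs i = ((cs.drop i).take (nsRun cs i - i)) :: tokensFrom cs (nsRun cs i + 1) := by
  conv_lhs => rw [tokensFrom]
  rw [nsSkip_mem cs i h hm, dif_pos h]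

lemma runsLoop_base (cs : List Char) (i : Nat) (h : cs.length ≤ i) :
    (∀ acc, runsLoop (cs.drop i) acc [] = acc ++ tokensFrom cs i) ∧
    (∀ acc cur, cur ≠ [] → runsLoop (cs.drop i) acc cur =
      (acc ++ [cur ++ (cs.drop i).take (nsRun cs i - i)]) ++ tokensFrom cs (nsRun cs i + 1)) := by
  have hd : cs.drop i = [] := List.drop_eq_nil_of_le h
  constructor
  · intro acc
    rw [hd, tokensFrom_stop cs i h]
    simp [runsLoop]
  · intro acc cur hcur
    rw [hd, nsRun_stop cs i h, tokensFrom_stop cs (i + 1) (by omega)]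
    simp [runsLoop, hcur]

lemma runsLoop_spec (cs : List Char) : ∀ n i, cs.length ≤ i + n →
    (∀ acc, runsLoop (cs.drop i) acc [] = acc ++ tokensFrom cs i) ∧
    (∀ acc cur, cur ≠ [] → runsLoop (cs.drop i) acc cur =
      (acc ++ [cur ++ (cs.drop i).take (nsRun cs i - i)]) ++ tokensFrom cs (nsRun cs i + 1)) := by
  intro n
  induction n with
  | zero => intro i hi; exact runsLoop_base cs i (by omega)
  | succ n ih =>
    intro i hi
    by_cases hlen : i < cs.length
    · have hdrop : cs.drop i = cs[i] :: cs.drop (i + 1) := List.drop_eq_getElem_cons hlen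
      have ih' := ih (i + 1) (by omega)
      by_cases hm : cs[i] ∈ id32
      · have hge := nsRun_ge cs (i + 1)
        have hrun : nsRun cs i = nsRun cs (i + 1) := nsRun_mem cs i hlen hm
        have htake : List.take (nsRun cs i - i) (cs[i] :: List.drop (i + 1) cs)
            = cs[i] :: List.take (nsRun cs (i + 1) - (i + 1)) (List.drop (i + 1) cs) := by
          rw [hrun, show nsRun cs (i + 1) - i = (nsRun cs (i + 1) - (i + 1)) + 1 from by omega,
            List.take_succ_cons]
        constructor
        · intro acc
          rw [hdrop, runsLoop, if_pos hm]
          rw [show ([] : List Char) ++ [cs[i]] = [cs[i]] from rfl]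
          rw [ih'.2 acc [cs[i]] (by simp)]
          rw [tokensFrom_mem cs i hlen hm, hdrop, htake, hrun]
          simp
        · intro acc cur hcur
          rw [hdrop, runsLoop, if_pos hm]
          rw [ih'.2 acc (cur ++ [cs[i]]) (by simp)]
          rw [htake, hrun]
          simp
      · have hrun0 : nsRun cs i = i := nsRun_notmem cs i hlen hm
        have hshift := tokensFrom_shift cs i hlen hm
        constructor
        · intro acc
          rw [hdrop, runsLoop, if_neg hm, if_neg (by simp)]
          rw [ih'.1 acc, hshift]
        · intro acc cur hcur
          rw [hdrop, runsLoop, if_neg hm, if_pos hcur]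
          rw [ih'.1 (acc ++ [cur]), hrun0]
          simp
    · exact runsLoop_base cs i (by omega)

lemma first_token (cs : List Char) (k : Nat) :
    (nextString cs k).1 = (tokensFrom cs k)[0]? := by
  rw [nextString, tokensFrom]
  by_cases h : nsSkip cs k < cs.length
  · simp [Nat.not_le.mpr h, h]
  · simp [Nat.le_of_not_lt h, h]

lemma second_token (cs : List Char) (i : Nat) :
    (nextString cs ((nextString cs i).2)).1 = (tokensFrom cs i)[1]? := by
  by_cases h : nsSkip cs i < cs.length
  · have h2 : (nextString cs i).2 = nsRun cs (nsSkip cs i) + 1 := by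
      rw [nextString]; simp [Nat.not_le.mpr h]
    rw [h2, tokensFrom, dif_pos h, List.getElem?_cons_succ, ← first_token]
  · have h2 : (nextString cs i).2 = nsSkip cs i := by
      rw [nextString]; simp [Nat.le_of_not_lt h]
    rw [h2, tokensFrom, dif_neg h]
    rw [nextString, nsSkip_stop cs (nsSkip cs i) (Nat.le_of_not_lt h)]
    simp [Nat.le_of_not_lt h]

-- ===== VERDICT (by name: the statement is the Claim_ definition above) =====
theorem readID32Line_spec : Claim_equal_readID32Line := by
  unfold Claim_equal_readID32Line Spec_readID32Line
  intro line _
  unfold readID32Line readID32Line_alt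
  simp only [skip_eq]
  set cs := line.toList with hcs
  set s := skipB cs 0 with hs
  have hruns : runsLoop (cs.drop (s + 4)) [] [] = tokensFrom cs (s + 4) :=
    ((runsLoop_spec cs cs.length (s + 4) (by omega)).1 [])
  rw [hruns]
  have key := second_token cs (s + 4)
  rw [key]
  congr 1
  rcases tokensFrom cs (s + 4) with _ | ⟨a, _ | ⟨b, t⟩⟩ <;> simp
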